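-- pv_equiv track=rewrite | github.com/Vanderson10/C-digos-Python-UFCG | minteste5/Seleciona/seleperf.py | seleciona_perfeitos
-- ===== SOURCE A (Python) =====
-- def seleciona_perfeitos(lista):
--     soma = 0
--     lista1 = []
--     for i in range(0,len(lista)):
--         for l in range(1,lista[i]):
--             if lista[i]%l==0:
--                 soma+=l
--
--         if lista[i]==soma:
--             lista1.append(soma)
--         soma = 0
--
--     return lista1
-- ===== SOURCE B (Python) =====
-- def _proper_div_sum(x):
--     # sum of proper divisors of x via divisor pairing up to sqrt(x); 0 for x <= 0
--     s = 0
--     d = 1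
--     while d * d <= x:
--         if x % d == 0:
--             if d != x:
--                 s += d
--             q = x // d
--             if q != d and q != x:
--                 s += q
--         d += 1
--     return s
--
-- def seleciona_perfeitos(lista):
--     return [x for x in lista if _proper_div_sum(x) == x]
-- ===== Notes on version B (the rewrite author's own statement) =====
-- stated objective: faster
-- what changed: Instead of summing every l in [1, x) per element, B sums proper divisors by a paired-divisor loop up to sqrt(x) (adding d and x//d together), then filters the list.
import Mathlib
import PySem

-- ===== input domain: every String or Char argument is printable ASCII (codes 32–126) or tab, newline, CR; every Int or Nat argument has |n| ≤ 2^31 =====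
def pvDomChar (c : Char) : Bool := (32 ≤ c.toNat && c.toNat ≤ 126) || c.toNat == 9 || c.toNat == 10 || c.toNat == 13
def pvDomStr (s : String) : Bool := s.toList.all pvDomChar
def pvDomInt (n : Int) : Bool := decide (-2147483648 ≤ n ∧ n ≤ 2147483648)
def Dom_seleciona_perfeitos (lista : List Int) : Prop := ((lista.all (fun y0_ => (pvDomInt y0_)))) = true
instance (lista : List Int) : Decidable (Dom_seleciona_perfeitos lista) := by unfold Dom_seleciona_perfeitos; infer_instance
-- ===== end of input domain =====

-- B replaces A's per-element scan of all l in [1, x) by a divisor-pairing loop up to sqrt(x): a different algorithm with fewer inner iterations per element.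

-- ===== PORT A =====
-- literal port of A: outer loop over indices carrying the state (soma, lista1);
-- lista[i] is always in range here, so pyGetD's default 0 is never used (exact)
def seleciona_perfeitos (lista : List Int) : List Int :=
  ((PySem.List.pyRange 0 (lista.length : Int) 1).foldl
    (fun (st : Int × List Int) i =>
      let x := PySem.List.pyGetD lista i 0
      let soma := (PySem.List.pyRange 1 x 1).foldl
        (fun soma l => if PySem.Int.mod x l = 0 then soma + l else soma) st.1
      let lista1 := if x = soma then st.2 ++ [soma] else st.2
      (0, lista1))
    ((0 : Int), ([] : List Int))).2

-- ===== PORT B =====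
-- Source B's 'while d*d <= x' loop; the fuel x.toNat+1 strictly bounds the number of
-- iterations (the loop stops once d exceeds sqrt x ≤ x), so it never cuts the loop short
def pvDivLoop (x : Int) : Nat → Int → Int → Int
  | 0, _, s => s
  | f+1, d, s =>
    if d * d ≤ x then
      let s1 := if PySem.Int.mod x d = 0 then
          let s2 := if d ≠ x then s + d else s
          let q := PySem.Int.floordiv x d
          if q ≠ d ∧ q ≠ x then s2 + q else s2
        else s
      pvDivLoop x f (d+1) s1
    else s

def pvProperDivSum (x : Int) : Int := pvDivLoop x (x.toNat + 1) 1 0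

def seleciona_perfeitos_alt (lista : List Int) : List Int :=
  lista.filter (fun x => pvProperDivSum x == x)

-- ===== PRECONDITION & SPEC =====
def Spec_seleciona_perfeitos (lista : List Int) (out : List Int) : Prop := out = seleciona_perfeitos_alt lista
instance (lista : List Int) (out : List Int) : Decidable (Spec_seleciona_perfeitos lista out) := by unfold Spec_seleciona_perfeitos; infer_instance

-- ===== CLAIM (what is proved, stated in full; the proofs are below) =====
def Claim_equal_seleciona_perfeitos : Prop := ∀ (lista : List Int), Dom_seleciona_perfeitos lista → Spec_seleciona_perfeitos lista (seleciona_perfeitos lista)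

-- ===== LEMMAS AND PROOFS =====

-- sum of proper divisors: the common value both inner loops compute
def pds (n : Nat) : Nat := ∑ d ∈ n.properDivisors, d

-- contribution of the candidate divisor e in B's loop, in Nat terms
def bContrib (n e : Nat) : Nat :=
  if e ∣ n then (if e ≠ n then e else 0) + (if n / e ≠ e ∧ n / e ≠ n then n / e else 0) else 0

lemma pds_eq_ico (n : Nat) : pds n = ∑ d ∈ Finset.Ico 1 n, (if d ∣ n then d else 0) := by
  unfold pds
  rw [← Finset.sum_filter]
  apply Finset.sum_congr _ (fun _ _ => rfl)
  ext d
  simp only [Nat.mem_properDivisors, Finset.mem_filter, Finset.mem_Ico]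
  constructor
  · rintro ⟨h1, h2⟩
    refine ⟨⟨?_, h2⟩, h1⟩
    rcases Nat.eq_zero_or_pos d with rfl | h
    · have := Nat.eq_zero_of_zero_dvd h1; omega
    · omega
  · rintro ⟨⟨_, h2⟩, h1⟩; exact ⟨h1, h2⟩

lemma sum_filter_range (p : Nat → Bool) (f : Nat → Int) :
    ∀ (m : Nat), (((List.range m).filter p).map f).sum = ∑ k ∈ Finset.range m, if p k then f k else 0 := by
  intro m
  induction m with
  | zero => simp
  | succ m ih =>
    rw [List.range_succ, List.filter_append, List.map_append, List.sum_append,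
      Finset.sum_range_succ, ih]
    by_cases h : p m <;> simp [h]

lemma foldl_ite_add (P : Int → Prop) [DecidablePred P] :
    ∀ (l : List Int) (s : Int),
      l.foldl (fun s e => if P e then s + e else s) s
        = s + ((l.filter (fun e => decide (P e))).map id).sum := by
  intro l
  induction l with
  | nil => intro s; simp
  | cons a t ih =>
    intro s
    by_cases h : P a <;> simp [h, ih, add_assoc]

-- A's inner loop computes the sum of proper divisors
lemma innerA_eq (x : Int) :
    (PySem.List.pyRange 1 x 1).foldl
        (fun soma l => if PySem.Int.mod x l = 0 then soma + l else soma) 0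
      = (pds x.toNat : Int) := by
  rcases le_or_gt x 1 with hx | hx
  · rw [PySem.List.pyRange_one_eq_nil hx]
    have h0 : x.toNat = 0 ∨ x.toNat = 1 := by omega
    rcases h0 with h0 | h0 <;> simp [h0, pds]
  · set n := x.toNat with hn
    have hxn : x = (n : Int) := by omega
    have hn2 : 2 ≤ n := by omega
    rw [foldl_ite_add (P := fun l => PySem.Int.mod x l = 0), zero_add,
      PySem.List.pyRange_one, List.filter_map, List.map_id, sum_filter_range]
    have hm : (x - 1).toNat = n - 1 := by omega
    rw [hm, pds_eq_ico, Finset.sum_Ico_eq_sum_range]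
    push_cast
    apply Finset.sum_congr rfl
    intro k _
    have hdvd : (PySem.Int.mod x (1 + (k : Int)) = 0) ↔ ((1 + k) ∣ n) := by
      rw [PySem.Int.mod_eq_zero_iff_dvd, hxn]
      constructor
      · intro h; exact_mod_cast h
      · intro h; exact_mod_cast h
    by_cases hd : (1 + k) ∣ n
    · simp [Function.comp, hd, hdvd]
    · simp [Function.comp, hd, hdvd]

-- the divisor-pairing identity: B's per-divisor contributions up to sqrt n sum to pds n
lemma key_sum (n : Nat) (hn : 1 ≤ n) :
    ∑ e ∈ Finset.Ico 1 (Nat.sqrt n + 1), bContrib n e = pds n := by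
  rcases eq_or_lt_of_le hn with h1 | hn2
  · subst h1; decide
  · have hn0 : n ≠ 0 := by omega
    have step1 : ∑ e ∈ Finset.Ico 1 (Nat.sqrt n + 1), bContrib n e
        = ∑ e ∈ n.divisors.filter (fun d => d * d ≤ n), bContrib n e := by
      refine (Finset.sum_subset ?_ ?_).symm
      · intro e he
        simp only [Finset.mem_filter, Nat.mem_divisors] at he
        obtain ⟨⟨hd, -⟩, hsq⟩ := he
        have h1 : 1 ≤ e := Nat.pos_of_dvd_of_pos hd (by omega)
        have h2 : e ≤ Nat.sqrt n := Nat.le_sqrt.mpr hsq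
        simp only [Finset.mem_Ico]; omega
      · intro e he hne
        simp only [Finset.mem_Ico] at he
        have hsq : e * e ≤ n := Nat.le_sqrt.mp (by omega)
        have hnd : ¬ e ∣ n := by
          intro hd
          exact hne (by simp [Finset.mem_filter, Nat.mem_divisors, hd, hn0, hsq])
        simp [bContrib, hnd]
    have hlt : ∀ e ∈ n.divisors.filter (fun d => d * d ≤ n), e ≠ n := by
      intro e he
      simp only [Finset.mem_filter, Nat.mem_divisors] at he
      have := Nat.sqrt_lt_self hn2
      have h2 : e ≤ Nat.sqrt n := Nat.le_sqrt.mpr he.2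
      omega
    have step2 : ∑ e ∈ n.divisors.filter (fun d => d * d ≤ n), bContrib n e
        = (∑ e ∈ n.divisors.filter (fun d => d * d ≤ n), e)
          + ∑ e ∈ n.divisors.filter (fun d => d * d ≤ n),
              (if n / e ≠ e ∧ n / e ≠ n then n / e else 0) := by
      rw [← Finset.sum_add_distrib]
      apply Finset.sum_congr rfl
      intro e he
      have hne := hlt e he
      simp only [Finset.mem_filter, Nat.mem_divisors] at he
      simp [bContrib, he.1.1, hne]
    have step3 : ∑ e ∈ n.divisors.filter (fun d => d * d ≤ n),
          (if n / e ≠ e ∧ n / e ≠ n then n / e else 0)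
        = ∑ e ∈ (n.divisors.filter (fun d => d * d ≤ n)).filter
            (fun d => n / d ≠ d ∧ n / d ≠ n), n / e := by
      exact (Finset.sum_filter _ _).symm
    have step4 : ∑ e ∈ (n.divisors.filter (fun d => d * d ≤ n)).filter
            (fun d => n / d ≠ d ∧ n / d ≠ n), n / e
        = ∑ e ∈ (n.divisors.filter (fun d => ¬ d * d ≤ n)).erase n, e := by
      refine Finset.sum_nbij' (fun d => n / d) (fun e => n / e) ?_ ?_ ?_ ?_ ?_
      · intro a ha
        simp only [Finset.mem_filter, Nat.mem_divisors] at ha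
        obtain ⟨⟨⟨hd, -⟩, hsq⟩, hne, hnn⟩ := ha
        have hde : a * (n / a) = n := Nat.mul_div_cancel' hd
        have ha1 : 1 ≤ a := Nat.pos_of_dvd_of_pos hd (by omega)
        have he1 : 1 ≤ n / a := Nat.div_pos (Nat.le_of_dvd (by omega) hd) (by omega)
        have hle : a ≤ n / a := by nlinarith
        have hlt2 : a < n / a := by omega
        have hbig : ¬ (n / a) * (n / a) ≤ n := by nlinarith
        simp only [Finset.mem_erase, Finset.mem_filter, Nat.mem_divisors]
        exact ⟨hnn, ⟨Nat.div_dvd_of_dvd hd, hn0⟩, hbig⟩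
      · intro a ha
        simp only [Finset.mem_erase, Finset.mem_filter, Nat.mem_divisors] at ha
        obtain ⟨hann, ⟨hd, -⟩, hbig⟩ := ha
        have hde : a * (n / a) = n := Nat.mul_div_cancel' hd
        have ha1 : 1 ≤ a := Nat.pos_of_dvd_of_pos hd (by omega)
        have hdlt : n / a < a := by nlinarith
        have hdd : n / (n / a) = a := Nat.div_div_self hd hn0
        have hsq : (n / a) * (n / a) ≤ n := by nlinarith
        simp only [Finset.mem_filter, Nat.mem_divisors]
        exact ⟨⟨⟨Nat.div_dvd_of_dvd hd, hn0⟩, hsq⟩, by omega, by omega⟩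
      · intro a ha
        simp only [Finset.mem_filter, Nat.mem_divisors] at ha
        exact Nat.div_div_self ha.1.1.1 hn0
      · intro a ha
        simp only [Finset.mem_erase, Finset.mem_filter, Nat.mem_divisors] at ha
        exact Nat.div_div_self ha.2.1.1 hn0
      · intro a _; rfl
    have hnL : n ∈ n.divisors.filter (fun d => ¬ d * d ≤ n) := by
      simp only [Finset.mem_filter, Nat.mem_divisors]
      refine ⟨⟨dvd_rfl, hn0⟩, by nlinarith⟩
    have step5 : (∑ e ∈ (n.divisors.filter (fun d => ¬ d * d ≤ n)).erase n, e) + n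
        = ∑ e ∈ n.divisors.filter (fun d => ¬ d * d ≤ n), e :=
      Finset.sum_erase_add _ _ hnL
    have step6 : (∑ e ∈ n.divisors.filter (fun d => d * d ≤ n), e)
        + (∑ e ∈ n.divisors.filter (fun d => ¬ d * d ≤ n), e)
        = ∑ e ∈ n.divisors, e := Finset.sum_filter_add_sum_filter_not _ _ _
    have step7 : ∑ e ∈ n.divisors, e = pds n + n :=
      Nat.sum_divisors_eq_sum_properDivisors_add_self
    omega

-- B's loop, characterised: from d = dn with enough fuel it adds the contributions of dn..sqrt n
lemma loopChar (n : Nat) (hn : 1 ≤ n) :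
    ∀ (fuel dn : Nat) (s : Int), 1 ≤ dn → Nat.sqrt n < dn + fuel →
      pvDivLoop (n : Int) fuel (dn : Int) s
        = s + ∑ e ∈ Finset.Ico dn (Nat.sqrt n + 1), (bContrib n e : Int) := by
  intro fuel
  induction fuel with
  | zero =>
    intro dn s h1 h2
    rw [Finset.Ico_eq_empty (by simp; omega)]
    simp [pvDivLoop]
  | succ f ih =>
    intro dn s h1 h2
    by_cases hle : dn ≤ Nat.sqrt n
    · have hcond : (dn : Int) * (dn : Int) ≤ (n : Int) := by
        exact_mod_cast Nat.le_sqrt.mp hle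
      have hmod : PySem.Int.mod (n : Int) (dn : Int) = ((n % dn : Nat) : Int) :=
        PySem.Int.mod_natCast n dn
      have hdiv : PySem.Int.floordiv (n : Int) (dn : Int) = ((n / dn : Nat) : Int) :=
        PySem.Int.floordiv_natCast n dn
      rw [pvDivLoop]
      simp only [if_pos hcond, hmod, hdiv]
      have hstep : (if ((n % dn : Nat) : Int) = 0 then
            (if ((n / dn : Nat) : Int) ≠ (dn : Int) ∧ ((n / dn : Nat) : Int) ≠ (n : Int)
              then (if (dn : Int) ≠ (n : Int) then s + (dn : Int) else s) + ((n / dn : Nat) : Int)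
              else (if (dn : Int) ≠ (n : Int) then s + (dn : Int) else s))
          else s) = s + (bContrib n dn : Int) := by
        unfold bContrib
        by_cases hd : dn ∣ n
        · have hm : n % dn = 0 := by obtain ⟨k, rfl⟩ := hd; simp [Nat.mul_mod_right]
          rw [hm, Nat.cast_zero, if_pos rfl, if_pos hd]
          have e1 : (((n / dn : Nat) : Int) = (dn : Int)) ↔ n / dn = dn := Nat.cast_inj
          have e2 : (((n / dn : Nat) : Int) = (n : Int)) ↔ n / dn = n := Nat.cast_inj
          have e3 : ((dn : Int) = (n : Int)) ↔ dn = n := Nat.cast_inj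
          simp only [ne_eq, e1, e2, e3]
          split_ifs <;> push_cast <;> omega
        · have hm0 : n % dn ≠ 0 := fun h => hd (Nat.dvd_of_mod_eq_zero h)
          rw [if_neg (by exact_mod_cast hm0), if_neg hd]
          simp
      rw [hstep, Finset.sum_eq_sum_Ico_succ_bot (by omega) (fun e => (bContrib n e : Int))]
      have : ((dn : Int) + 1) = ((dn + 1 : Nat) : Int) := by push_cast; ring
      rw [this, ih (dn + 1) (s + (bContrib n dn : Int)) (by omega) (by omega)]
      ring
    · have hcond : ¬ ((dn : Int) * (dn : Int) ≤ (n : Int)) := by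
        have : n < dn * dn := Nat.sqrt_lt.mp (by omega)
        push Not
        exact_mod_cast this
      rw [pvDivLoop, if_neg hcond, Finset.Ico_eq_empty (by simp; omega)]
      simp

-- B's helper computes the sum of proper divisors, for every integer input
lemma pvProperDivSum_eq (x : Int) : pvProperDivSum x = (pds x.toNat : Int) := by
  rcases le_or_gt x 0 with hx | hx
  · have h0 : x.toNat = 0 := by omega
    have hc : ¬ ((1 : Int) * 1 ≤ x) := by omega
    show pvDivLoop x (x.toNat + 1) 1 0 = _
    rw [h0]
    have hz : pvDivLoop x 1 1 0 = 0 := by rw [pvDivLoop, if_neg hc]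
    rw [hz]
    simp [pds]
  · set n := x.toNat with hn
    have hxn : x = (n : Int) := by omega
    have hn1 : 1 ≤ n := by omega
    show pvDivLoop x (x.toNat + 1) 1 0 = _
    rw [← hn, hxn]
    have h1 : ((1 : Nat) : Int) = (1 : Int) := by norm_num
    rw [← h1, loopChar n hn1 (n + 1) 1 0 (by omega) (by have := Nat.sqrt_le_self n; omega)]
    rw [zero_add, ← Nat.cast_sum, key_sum n hn1]

-- the outer fold of A's port produces the filter of B
lemma foldA_eq (l : List Int) :
    ∀ (acc : List Int),
      (l.foldl
        (fun (st : Int × List Int) x =>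
          let soma := (PySem.List.pyRange 1 x 1).foldl
            (fun soma l => if PySem.Int.mod x l = 0 then soma + l else soma) st.1
          let lista1 := if x = soma then st.2 ++ [soma] else st.2
          ((0 : Int), lista1))
        ((0 : Int), acc))
      = ((0 : Int), acc ++ l.filter (fun x => pvProperDivSum x == x)) := by
  induction l with
  | nil => intro acc; simp
  | cons a t ih =>
    intro acc
    rw [List.foldl_cons]
    have hsum : (PySem.List.pyRange 1 a 1).foldl
        (fun soma l => if PySem.Int.mod a l = 0 then soma + l else soma) (0 : Int)
        = pvProperDivSum a := by
      rw [innerA_eq, pvProperDivSum_eq]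
    by_cases h : a = pvProperDivSum a
    · have hb : (pvProperDivSum a == a) = true := by simp [h.symm]
      simp only [hsum, if_pos h, List.filter_cons, hb]
      rw [ih (acc ++ [pvProperDivSum a])]
      simp [← h]
    · have hb : (pvProperDivSum a == a) = false := by simp; omega
      simp only [hsum, if_neg h, List.filter_cons, hb]
      rw [ih acc]
      simp

-- ===== VERDICT (by name: the statement is the Claim_ definition above) =====
theorem seleciona_perfeitos_spec : Claim_equal_seleciona_perfeitos := by
  intro lista _
  unfold Spec_seleciona_perfeitos seleciona_perfeitos seleciona_perfeitos_alt
  rw [PySem.List.foldl_pyRange_zero_pyGetD' lista 0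
    (fun (st : Int × List Int) x =>
      let soma := (PySem.List.pyRange 1 x 1).foldl
        (fun soma l => if PySem.Int.mod x l = 0 then soma + l else soma) st.1
      let lista1 := if x = soma then st.2 ++ [soma] else st.2
      ((0 : Int), lista1))
    ((0 : Int), ([] : List Int))]
  rw [foldA_eq lista []]
  simp
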